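-- pv_equiv track=rewrite | github.com/demew/kakuro_helper | init/kakuro_table_populate.py | getNextCombo
-- ===== SOURCE A (Python) =====
-- def getNextCombo(combo, num):
--   combo[num] += 1
--   if ((combo[num] > 9) and (num == 0)):
--     return (-1, combo)
--   while (combo[num] > 9):
--     nc_tuple = getNextCombo(combo, num-1)
--     i = nc_tuple[0]
--     combo = nc_tuple[1]
--     if (i == -1):
--       return (-1, combo)
--     combo[num] = i+1
--   return (combo[num], combo)
-- ===== SOURCE B (Python) =====
-- def getNextCombo(combo, num):
--   # Iterative re-implementation: the recursion of the original is replaced by an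
--   # explicit position pointer p that walks left on carries and right on refills.
--   # Mutates combo in place exactly like the original (same write sequence).
--   p = num
--   combo[p] += 1
--   if combo[p] > 9 and p == 0:
--     return (-1, combo)
--   while True:
--     if combo[p] > 9:
--       p -= 1
--       combo[p] += 1
--       if combo[p] > 9 and p == 0:
--         return (-1, combo)
--     else:
--       i = combo[p]
--       if p == num:
--         return (i, combo)
--       p += 1
--       if i == -1:
--         return (-1, combo)
--       combo[p] = i + 1
-- ===== Notes on version B (the rewrite author's own statement) =====
-- stated objective: alternative
-- what changed: The call-stack recursion with an inner while-loop is replaced by a single flat loop over an explicit position pointer (carry moves it left, refill moves it right), removing recursion entirely (O(1) stack, no RecursionError on deep carries) while performing the identical write sequence and returning the identical tuple.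
import Mathlib
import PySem

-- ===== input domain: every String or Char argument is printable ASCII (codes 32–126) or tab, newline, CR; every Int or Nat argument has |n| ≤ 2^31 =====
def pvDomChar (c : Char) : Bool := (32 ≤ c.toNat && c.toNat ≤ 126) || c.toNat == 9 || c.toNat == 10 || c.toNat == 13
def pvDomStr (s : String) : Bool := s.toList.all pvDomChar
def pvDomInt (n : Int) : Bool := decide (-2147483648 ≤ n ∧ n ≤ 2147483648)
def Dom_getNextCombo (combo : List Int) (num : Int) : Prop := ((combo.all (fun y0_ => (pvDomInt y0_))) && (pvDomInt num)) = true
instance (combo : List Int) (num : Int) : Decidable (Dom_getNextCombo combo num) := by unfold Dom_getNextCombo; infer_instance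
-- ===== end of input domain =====

-- Both programs mutate `combo` in place with the IDENTICAL write sequence; the equivalence
-- proved here is about the returned (value, list) pair.  B replaces the recursion by a flat
-- pointer loop (alternative decomposition, O(1) stack).

-- Shared Python-exact primitives: combo[i] read (total form; Pre_ excludes the raising inputs)
-- and combo[i] = v write, both with Python's negative-index wraparound (PySem).
def pvGeti (c : List Int) (i : Int) : Int := PySem.List.pyGetD c i 0
def pvSet (c : List Int) (i v : Int) : List Int := PySem.List.pySetD c i v
-- combo[i] += 1
def pvBump (c : List Int) (i : Int) : List Int := pvSet c i (pvGeti c i + 1)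
-- fuel: a totality guard for both fueled ports; one unit is consumed per elementary step
-- (an increment-entry, a settle-return, a refill iteration).  The worst case over lists of
-- length n is below 2^(n+2) steps, so this bound is never reached on inputs the claims cover.
def pvFuel (c : List Int) : Nat := 2 ^ (c.length + 8)

-- ===== PORT A =====
-- Literal port of A.  mode true = entry of getNextCombo(combo, m) (the `combo[num] += 1`
-- and the `num == 0` exhaustion return); mode false = the `while combo[num] > 9` loop.
-- Fuel threads through as a totality guard (the Fin f component is the fuel left over,
-- so that the while-loop's continuation after a recursive call is well-founded);
-- `none` = out of fuel (never reached under pvFuel on the inputs the claims cover).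
def runA (mode : Bool) (f : Nat) (c : List Int) (m : Int) :
    Option ((Int × List Int) × Fin f) :=
  match mode with
  | true =>
    match f with
    | 0 => none
    | f' + 1 =>
      -- combo[num] += 1
      let c2 := pvBump c m
      -- if combo[num] > 9 and num == 0: return (-1, combo)
      if 9 < pvGeti c2 m ∧ m = 0 then
        match f' with
        | 0 => none
        | f'' + 1 => some ((-1, c2), ⟨f'', by omega⟩)
      else
        match runA false f' c2 m with
        | none => none
        | some (r, g) => some (r, ⟨g.1, Nat.lt_succ_of_lt g.isLt⟩)
  | false =>
    -- while combo[num] > 9: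
    if 9 < pvGeti c m then
      match runA true f c (m - 1) with
      | none => none
      | some ((i, c'), g) =>
        -- if i == -1: return (-1, combo)
        if i = -1 then some ((-1, c'), g)
        else
          -- combo[num] = i + 1, and loop again
          match runA false g.1 (pvSet c' m (i + 1)) m with
          | none => none
          | some (r, g') => some (r, ⟨g'.1, Nat.lt_trans g'.isLt g.isLt⟩)
    else
      -- return (combo[num], combo)
      match f with
      | 0 => none
      | f' + 1 => some ((pvGeti c m, c), ⟨f', Nat.lt_succ_self f'⟩)
termination_by 2 * f + (if mode then 0 else 1)
decreasing_by
  · simp only [if_true, if_false]; omega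
  · simp only [if_true, if_false]; omega
  · have h := g.isLt; simp only [if_false]; omega

def getNextCombo (combo : List Int) (num : Int) : Int × List Int :=
  ((runA true (pvFuel combo) combo num).map (fun x => x.1)).getD (0, [])

-- ===== PORT B =====
-- Literal port of B's flat loop: state is (combo, p); one fuel unit per loop iteration,
-- returning the fuel left over; `none` = out of fuel (never reached under pvFuel on the
-- inputs the claims cover).
def runB (f : Nat) (c : List Int) (p num : Int) : Option ((Int × List Int) × Nat) :=
  if 9 < pvGeti c p then
    match f with
    | 0 => none
    | f' + 1 =>
      -- p -= 1; combo[p] += 1; if combo[p] > 9 and p == 0: return (-1, combo)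
      let c2 := pvBump c (p - 1)
      if 9 < pvGeti c2 (p - 1) ∧ p - 1 = 0 then
        match f' with
        | 0 => none
        | f'' + 1 => some ((-1, c2), f'')
      else runB f' c2 (p - 1) num
  else
    match f with
    | 0 => none
    | f' + 1 =>
      -- i = combo[p]; if p == num: return (i, combo); p += 1; if i == -1: …; combo[p] = i+1
      if p = num then some ((pvGeti c p, c), f')
      else if pvGeti c p = -1 then some ((-1, c), f')
      else runB f' (pvSet c (p + 1) (pvGeti c p + 1)) (p + 1) num
termination_by f

-- the pre-loop part of B: p = num; combo[p] += 1; the p == 0 exhaustion check; then the loop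
def altRun (f : Nat) (c : List Int) (num : Int) : Option ((Int × List Int) × Nat) :=
  match f with
  | 0 => none
  | f' + 1 =>
    let c1 := pvBump c num
    if 9 < pvGeti c1 num ∧ num = 0 then
      match f' with
      | 0 => none
      | f'' + 1 => some ((-1, c1), f'')
    else runB f' c1 num num

def getNextCombo_alt (combo : List Int) (num : Int) : Int × List Int :=
  ((altRun (pvFuel combo) combo num).map (fun x => x.1)).getD (0, [])

-- ===== PRECONDITION & SPEC =====
-- Pre_ holds exactly where the Python A returns normally: any in-range non-negative num, and a
-- negative (wrapped) num whenever the carry walk stops at some position before running off the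
-- left end (at position q it stops unless combo[q] >= -1 and combo[q]+1 overflows the staircase
-- to the wrapped position num+len); everywhere else A raises IndexError.
def Pre_getNextCombo (combo : List Int) (num : Int) : Prop :=
  (0 ≤ num ∧ num < combo.length) ∨
  (-(combo.length : Int) ≤ num ∧ num < 0 ∧
    ∃ q ∈ List.range (num + combo.length + 1).toNat,
      ¬(-1 ≤ combo.getD q 0 ∧ 9 < combo.getD q 0 + 1 + (num + combo.length - q)))
instance (combo : List Int) (num : Int) : Decidable (Pre_getNextCombo combo num) := by
  unfold Pre_getNextCombo; infer_instance
def pvWitness_getNextCombo : List Int × Int := ([1, 2, 3], 2)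

def Spec_getNextCombo (combo : List Int) (num : Int) (out : Int × List Int) : Prop := out = getNextCombo_alt combo num
instance (combo : List Int) (num : Int) (out : Int × List Int) : Decidable (Spec_getNextCombo combo num out) := by unfold Spec_getNextCombo; infer_instance

-- ===== CLAIM (what is proved, stated in full; the proofs are below) =====
def Claim_equal_getNextCombo : Prop := ∀ (combo : List Int) (num : Int), Dom_getNextCombo combo num → Pre_getNextCombo combo num → Spec_getNextCombo combo num (getNextCombo combo num)

-- ===== LEMMAS AND PROOFS =====

-- runA with the Fin fuel bound stripped to a plain Nat
def runAN (mode : Bool) (f : Nat) (c : List Int) (m : Int) :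
    Option ((Int × List Int) × Nat) :=
  (runA mode f c m).map (fun x => (x.1, x.2.1))

-- one carry iteration of B (= the body of runB's carry branch, and altRun at m = num)
def pvCarryStep (f : Nat) (c : List Int) (m num : Int) : Option ((Int × List Int) × Nat) :=
  match f with
  | 0 => none
  | f' + 1 =>
    let c2 := pvBump c m
    if 9 < pvGeti c2 m ∧ m = 0 then
      match f' with
      | 0 => none
      | f'' + 1 => some ((-1, c2), f'')
    else runB f' c2 m num

-- B's continuation after A's inner call at level p has delivered its result
def contB (r : Option ((Int × List Int) × Nat)) (p num : Int) :
    Option ((Int × List Int) × Nat) :=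
  match r with
  | none => none
  | some ((i, c'), g) =>
    if p = num then some ((i, c'), g)
    else if i = -1 then some ((-1, c'), g)
    else runB g (pvSet c' (p + 1) (i + 1)) (p + 1) num

lemma runB_carry {f : Nat} {c : List Int} {p num : Int} (h : 9 < pvGeti c p) :
    runB f c p num = pvCarryStep f c (p - 1) num := by
  rw [runB.eq_def, if_pos h]
  cases f <;> rfl

lemma runB_zero (c : List Int) (p num : Int) : runB 0 c p num = none := by
  rw [runB.eq_def]
  split <;> rfl

lemma runB_settle_succ {f' : Nat} {c : List Int} {p num : Int} (h : ¬ 9 < pvGeti c p) :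
    runB (f' + 1) c p num =
      (if p = num then some ((pvGeti c p, c), f')
       else if pvGeti c p = -1 then some ((-1, c), f')
       else runB f' (pvSet c (p + 1) (pvGeti c p + 1)) (p + 1) num) := by
  rw [runB.eq_def, if_neg h]

lemma altRun_eq (f : Nat) (c : List Int) (num : Int) :
    altRun f c num = pvCarryStep f c num num := rfl

lemma pvCarryStep_zero (c : List Int) (m num : Int) : pvCarryStep 0 c m num = none := rfl

lemma pvCarryStep_succ (f' : Nat) (c : List Int) (m num : Int) :
    pvCarryStep (f' + 1) c m num =
      (if 9 < pvGeti (pvBump c m) m ∧ m = 0 then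
        (match f' with
         | 0 => none
         | f'' + 1 => some ((-1, pvBump c m), f''))
      else runB f' (pvBump c m) m num) := rfl

lemma runAN_true_zero (c : List Int) (m : Int) : runAN true 0 c m = none := by
  unfold runAN; rw [runA.eq_def]; rfl

lemma runAN_true_succ (f' : Nat) (c : List Int) (m : Int) :
    runAN true (f' + 1) c m =
      (if 9 < pvGeti (pvBump c m) m ∧ m = 0 then
        (match f' with
         | 0 => none
         | f'' + 1 => some ((-1, pvBump c m), f''))
      else runAN false f' (pvBump c m) m) := by
  unfold runAN
  rw [runA.eq_def]
  simp only
  by_cases hs : 9 < pvGeti (pvBump c m) m ∧ m = 0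
  · rw [if_pos hs, if_pos hs]
    cases f' with
    | zero => rfl
    | succ f'' => rfl
  · rw [if_neg hs, if_neg hs]
    cases h : runA false f' (pvBump c m) m with
    | none => simp
    | some x => simp

lemma runAN_false_carry {f : Nat} {c : List Int} {m : Int} (h : 9 < pvGeti c m) :
    runAN false f c m =
      (match runAN true f c (m - 1) with
       | none => none
       | some ((i, c'), g) =>
         if i = -1 then some ((-1, c'), g)
         else runAN false g (pvSet c' m (i + 1)) m) := by
  unfold runAN
  rw [runA.eq_def]
  simp only [if_pos h]
  cases hA : runA true f c (m - 1) with
  | none => simp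
  | some x =>
    obtain ⟨⟨i, c'⟩, g⟩ := x
    simp only [Option.map_some]
    by_cases hi : i = -1
    · simp [hi]
    · rw [if_neg hi]
      simp only [if_neg hi]
      cases hB : runA false g.1 (pvSet c' m (i + 1)) m with
      | none => simp
      | some y => simp

lemma runAN_false_settle {f : Nat} {c : List Int} {m : Int} (h : ¬ 9 < pvGeti c m) :
    runAN false f c m =
      (match f with
       | 0 => none
       | f' + 1 => some ((pvGeti c m, c), f')) := by
  unfold runAN
  rw [runA.eq_def]
  simp only [if_neg h]
  cases f <;> rfl

lemma runAN_false_carry_none {f : Nat} {c : List Int} {m : Int} (h : 9 < pvGeti c m)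
    (hA : runAN true f c (m - 1) = none) : runAN false f c m = none := by
  rw [runAN_false_carry h, hA]

lemma runAN_false_carry_some {f : Nat} {c : List Int} {m i : Int} {c' : List Int} {g : Nat}
    (h : 9 < pvGeti c m) (hA : runAN true f c (m - 1) = some ((i, c'), g)) :
    runAN false f c m =
      (if i = -1 then some ((-1, c'), g) else runAN false g (pvSet c' m (i + 1)) m) := by
  rw [runAN_false_carry h, hA]

lemma contB_some (i : Int) (c' : List Int) (g : Nat) (p num : Int) :
    contB (some ((i, c'), g)) p num =
      (if p = num then some ((i, c'), g)
       else if i = -1 then some ((-1, c'), g)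
       else runB g (pvSet c' (p + 1) (i + 1)) (p + 1) num) := rfl

lemma runAN_leftover_lt {mode : Bool} {f : Nat} {c : List Int} {m : Int}
    {r : Int × List Int} {g : Nat} (h : runAN mode f c m = some (r, g)) : g < f := by
  unfold runAN at h
  cases hA : runA mode f c m with
  | none => rw [hA] at h; simp at h
  | some x =>
    rw [hA] at h
    simp only [Option.map_some, Option.some.injEq] at h
    have h2 : x.2.1 = g := congrArg Prod.snd h
    rw [← h2]
    exact x.2.isLt

lemma contB_self (r : Option ((Int × List Int) × Nat)) (num : Int) :
    contB r num num = r := by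
  cases r with
  | none => rfl
  | some x => obtain ⟨⟨i, c'⟩, g⟩ := x; simp [contB]

lemma pvM1 (f : Nat)
    (ih : ∀ g, g < f → ∀ (c : List Int) (p num : Int), p ≤ num →
      contB (runAN false g c p) p num = runB g c p num) :
    ∀ (c : List Int) (m num : Int), m ≤ num →
      contB (runAN true f c m) m num = pvCarryStep f c m num := by
  intro c m num _
  cases f with
  | zero => rw [runAN_true_zero, pvCarryStep_zero]; rfl
  | succ f' =>
    rw [runAN_true_succ, pvCarryStep_succ]
    by_cases hs : 9 < pvGeti (pvBump c m) m ∧ m = 0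
    · rw [if_pos hs, if_pos hs]
      cases f' with
      | zero => rfl
      | succ f'' =>
        simp only [contB]
        by_cases hm : m = num <;> simp [hm]
    · rw [if_neg hs, if_neg hs]
      exact ih f' (Nat.lt_succ_self f') _ _ _ ‹m ≤ num›

lemma pvM2 : ∀ (f : Nat) (c : List Int) (p num : Int), p ≤ num →
    contB (runAN false f c p) p num = runB f c p num := by
  intro f
  induction f using Nat.strong_induction_on with
  | _ f IH =>
    intro c p num hp
    by_cases hv : 9 < pvGeti c p
    · rw [runB_carry hv,
        ← pvM1 f (fun g hg => IH g hg) c (p - 1) num (by omega)]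
      cases hA : runAN true f c (p - 1) with
      | none => rw [runAN_false_carry_none hv hA]; rfl
      | some x =>
        obtain ⟨⟨i, c'⟩, g⟩ := x
        have hne : ¬(p - 1 = num) := by omega
        rw [runAN_false_carry_some hv hA, contB_some, if_neg hne]
        by_cases hi : i = -1
        · subst hi
          rw [if_pos rfl, if_pos rfl, contB_some]
          by_cases hm : p = num
          · rw [if_pos hm]
          · rw [if_neg hm, if_pos rfl]
        · rw [if_neg hi, if_neg hi]
          have hstep : p - 1 + 1 = p := by omega
          rw [hstep]
          exact IH g (runAN_leftover_lt hA) _ _ _ hp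
    · rw [runAN_false_settle hv]
      cases f with
      | zero => rw [runB_zero]; rfl
      | succ f' =>
        rw [runB_settle_succ hv, contB_some]

lemma pvTop (f : Nat) (c : List Int) (num : Int) : runAN true f c num = altRun f c num := by
  rw [altRun_eq, ← pvM1 f (fun g _ => pvM2 g) c num num le_rfl, contB_self]

lemma portA_eq (c : List Int) (num : Int) :
    getNextCombo c num = ((runAN true (pvFuel c) c num).map (fun x => x.1)).getD (0, []) := by
  unfold getNextCombo runAN
  cases runA true (pvFuel c) c num <;> rfl

-- ===== VERDICT (by name: the statement is the Claim_ definition above) =====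
theorem getNextCombo_spec : Claim_equal_getNextCombo := by
  unfold Claim_equal_getNextCombo Spec_getNextCombo
  intro combo num _ _
  rw [portA_eq, pvTop]
  rfl
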